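-- pv_equiv track=rewrite | github.com/desol1997/algorythms_and_data_structures | algorythms/greedy_algorythms/various_terms.py | various_terms
-- ===== SOURCE A (Python) =====
-- def various_terms(n):
--     terms_list = []
--     for i in range(1, n + 1):
--         if n >= i:
--             terms_list.append(i)
--             n -= i
--         else:
--             terms_list[-1] += n
--             break
--
--     return terms_list
-- ===== SOURCE B (Python) =====
-- def various_terms(n):
--     if n <= 0:
--         return []
--     # integer sqrt of x = 8n+1 by Newton iteration (no float, exact)
--     x = 8 * n + 1
--     r = x
--     s = (r + x // r) // 2
--     while s < r:
--         r = s
--         s = (r + x // r) // 2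
--     k = (r - 1) // 2          # number of terms: largest k whose triangular number fits
--     terms = list(range(1, k + 1))
--     terms[-1] += n - k * (k + 1) // 2
--     return terms
-- ===== Notes on version B (the rewrite author's own statement) =====
-- stated objective: alternative
-- what changed: Replaces the element-by-element subtract-and-append greedy loop by a closed form: a Newton integer square root yields the number of terms directly, the run of consecutive integers is emitted at once via range, and the leftover is added to the last term.
import Mathlib
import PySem

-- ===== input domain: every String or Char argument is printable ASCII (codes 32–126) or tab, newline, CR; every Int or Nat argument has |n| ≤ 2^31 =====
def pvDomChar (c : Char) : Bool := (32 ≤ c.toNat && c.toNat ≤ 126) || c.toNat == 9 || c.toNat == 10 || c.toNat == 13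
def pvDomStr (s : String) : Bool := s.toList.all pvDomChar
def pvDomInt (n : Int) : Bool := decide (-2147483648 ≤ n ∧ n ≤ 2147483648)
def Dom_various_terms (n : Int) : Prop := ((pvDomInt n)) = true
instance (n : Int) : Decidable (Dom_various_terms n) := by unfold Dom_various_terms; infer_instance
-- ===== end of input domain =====

-- B replaces the subtract-and-test greedy loop by a closed form via an integer Newton isqrt (objective: alternative algorithm).

-- ===== PORT A =====
-- 'terms_list[-1] += v' (shared Python idiom of both sources; in every reached call terms_list is nonempty)
def vtBump (ts : List Int) (v : Int) : List Int := ts.dropLast ++ [ts.getLast! + v]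

-- the for-loop of A over range(1, n+1) with early break; state: terms_list, current n
def vtLoop : List Int → List Int → Int → List Int
  | [], terms, _ => terms
  | i :: rest, terms, m =>
      if m ≥ i then vtLoop rest (terms ++ [i]) (m - i)
      else vtBump terms m

def various_terms (n : Int) : List Int :=
  vtLoop (PySem.List.pyRange 1 (n + 1) 1) [] n

-- ===== PORT B =====
-- B's 'while s < r' Newton loop; fuel (first argument) only makes the recursion structural,
-- r strictly decreases so fuel x.toNat is never exhausted on the call below
def vtIsqrtGo : Nat → Int → Int → Int → Int
  | 0, _, r, _ => r
  | f + 1, x, r, s =>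
      if s < r then vtIsqrtGo f x s (PySem.Int.floordiv (s + PySem.Int.floordiv x s) 2)
      else r

def various_terms_alt (n : Int) : List Int :=
  if n ≤ 0 then []
  else
    let x := 8 * n + 1
    let r := vtIsqrtGo x.toNat x x (PySem.Int.floordiv (x + PySem.Int.floordiv x x) 2)
    let k := PySem.Int.floordiv (r - 1) 2
    let terms := PySem.List.pyRange 1 (k + 1) 1
    vtBump terms (n - PySem.Int.floordiv (k * (k + 1)) 2)

-- ===== PRECONDITION & SPEC =====
def Spec_various_terms (n : Int) (out : List Int) : Prop := out = various_terms_alt n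
instance (n : Int) (out : List Int) : Decidable (Spec_various_terms n out) := by unfold Spec_various_terms; infer_instance

-- ===== CLAIM (what is proved, stated in full; the proofs are below) =====
def Claim_equal_various_terms : Prop := ∀ (n : Int), Dom_various_terms n → Spec_various_terms n (various_terms n)

-- ===== LEMMAS AND PROOFS =====

lemma vtBump_zero (ts : List Int) (h : ts ≠ []) : vtBump ts 0 = ts := by
  obtain ⟨l, a, rfl⟩ := (List.eq_nil_or_concat' ts).resolve_left h
  simp [vtBump]

-- Newton-iteration correctness: result is the integer square root bracket
lemma vtIsqrtGo_spec (f : Nat) : ∀ (x r : Int), 2 ≤ x → 1 ≤ r → r.toNat ≤ f →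
    x < (r + 1) * (r + 1) →
    1 ≤ vtIsqrtGo f x r (PySem.Int.floordiv (r + PySem.Int.floordiv x r) 2) ∧
    (vtIsqrtGo f x r (PySem.Int.floordiv (r + PySem.Int.floordiv x r) 2)) *
      (vtIsqrtGo f x r (PySem.Int.floordiv (r + PySem.Int.floordiv x r) 2)) ≤ x ∧
    x < (vtIsqrtGo f x r (PySem.Int.floordiv (r + PySem.Int.floordiv x r) 2) + 1) *
      (vtIsqrtGo f x r (PySem.Int.floordiv (r + PySem.Int.floordiv x r) 2) + 1) := by
  induction f with
  | zero => intro x r h2 h1 hf _; omega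
  | succ f ih =>
    intro x r h2 h1 hf hinv
    have hr0 : 0 < r := by omega
    have hfd : PySem.Int.floordiv x r = x / r := PySem.Int.floordiv_eq_ediv_of_pos (by omega)
    set q : Int := x / r with hq
    have hq0 : 0 ≤ q := Int.ediv_nonneg (by omega) (by omega)
    have hdm : r * q + x % r = x := by
      have h' := Int.mul_ediv_add_emod x r
      rw [← hq] at h'
      exact h'
    have hxq : x < r * q + r := by
      have := Int.emod_lt_of_pos x hr0
      omega
    have hxq' : r * q ≤ x := by
      have := Int.emod_nonneg x (show r ≠ 0 by omega)
      omega
    have hs : PySem.Int.floordiv (r + PySem.Int.floordiv x r) 2 = (r + q) / 2 := by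
      rw [hfd, PySem.Int.floordiv_eq_ediv_of_pos (by omega)]
    set s : Int := (r + q) / 2 with hsdef
    have hs2 : 2 * s ≤ r + q ∧ r + q - 1 ≤ 2 * s := by omega
    have hs0 : 0 ≤ s := by omega
    have hsinv : x < (s + 1) * (s + 1) := by
      nlinarith [sq_nonneg (r - q - 1), hs2.2, hxq, hq0, hr0]
    have hs1 : 1 ≤ s := by nlinarith [hsinv, hs0, h2]
    rw [hs]
    by_cases hlt : s < r
    · have : vtIsqrtGo (f + 1) x r s
          = vtIsqrtGo f x s (PySem.Int.floordiv (s + PySem.Int.floordiv x s) 2) := by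
        simp [vtIsqrtGo, hlt]
      rw [this]
      exact ih x s h2 hs1 (by omega) hsinv
    · have hres : vtIsqrtGo (f + 1) x r s = r := by simp [vtIsqrtGo, hlt]
      rw [hres]
      refine ⟨h1, ?_, hinv⟩
      have hrq : r ≤ q := by omega
      nlinarith [hxq', hrq, hr0]

-- The greedy loop of A, started in a consistent state, lands on the closed form.
lemma vtLoop_spec (n k rem : Int) (hk : 1 ≤ k)
    (h1 : k * (k + 1) ≤ 2 * n) (h2 : 2 * n < (k + 1) * (k + 2))
    (hrem : 2 * rem = 2 * n - k * (k + 1)) :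
    ∀ (d : Nat) (i m : Int) (terms : List Int),
      i = k + 1 - d → 1 ≤ i → 2 * m = 2 * n - (i - 1) * i →
      (terms ≠ [] ∨ i ≤ k) →
      vtLoop (PySem.List.pyRange i (n + 1) 1) terms m
        = vtBump (terms ++ PySem.List.pyRange i (k + 1) 1) rem := by
  have hkn : k ≤ n := by nlinarith
  intro d
  induction d with
  | zero =>
    intro i m terms hi h1i hm hne
    have hik : i = k + 1 := by omega
    subst hik
    have hmm : (k + 1 - 1) * (k + 1) = k * (k + 1) := by ring
    rw [hmm] at hm
    have hmrem : m = rem := by omega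
    have hrng : PySem.List.pyRange (k + 1) (k + 1) 1 = [] :=
      PySem.List.pyRange_one_eq_nil (le_refl _)
    rw [hrng, List.append_nil]
    have hterms : terms ≠ [] := by
      rcases hne with h | h
      · exact h
      · omega
    by_cases hin : k + 1 ≤ n
    · rw [PySem.List.pyRange_one_cons (by omega)]
      have hml : ¬ m ≥ (k + 1 : Int) := by nlinarith
      simp only [vtLoop, if_neg hml]
      rw [hmrem]
    · -- range over: only possible when n = k = 1, rem = 0
      have hk1 : k = 1 := by nlinarith
      subst hk1
      have hn1 : n = 1 := by omega
      subst hn1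
      have hrem0 : rem = 0 := by omega
      have hrng2 : PySem.List.pyRange (1 + 1) (1 + 1) 1 = ([] : List Int) :=
        PySem.List.pyRange_one_eq_nil (by omega)
      rw [hrng2, hrem0, vtBump_zero terms hterms]
      rfl
  | succ d ih =>
    intro i m terms hi h1i hm hne
    have hik : i ≤ k := by omega
    have hii : i * (i + 1) ≤ k * (k + 1) := by nlinarith
    have hmi : m ≥ i := by nlinarith
    rw [PySem.List.pyRange_one_cons (show i < n + 1 by omega)]
    simp only [vtLoop, if_pos hmi]
    have := ih (i + 1) (m - i) (terms ++ [i]) (by omega) (by omega)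
      (by nlinarith) (Or.inl (by simp))
    rw [this, List.append_assoc]
    congr 2
    rw [PySem.List.pyRange_one_cons (show i < k + 1 by omega)]
    rfl

-- ===== VERDICT (by name: the statement is the Claim_ definition above) =====
theorem various_terms_spec : Claim_equal_various_terms := by
  intro n _
  unfold Spec_various_terms
  by_cases hn : n ≤ 0
  · rw [various_terms_alt, if_pos hn]
    rw [various_terms, PySem.List.pyRange_one_eq_nil (by omega)]
    rfl
  · have hn1 : 1 ≤ n := by omega
    rw [various_terms_alt, if_neg hn]
    set x : Int := 8 * n + 1 with hx
    have hx2 : 2 ≤ x := by omega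
    obtain ⟨hr1, hrl, hru⟩ := vtIsqrtGo_spec x.toNat x x hx2 (by omega) (le_refl _)
      (by nlinarith)
    set r : Int := vtIsqrtGo x.toNat x x
      (PySem.Int.floordiv (x + PySem.Int.floordiv x x) 2) with hrdef
    have hr3 : 3 ≤ r := by nlinarith
    have hkfd : PySem.Int.floordiv (r - 1) 2 = (r - 1) / 2 :=
      PySem.Int.floordiv_eq_ediv_of_pos (by omega)
    set k : Int := (r - 1) / 2 with hkdef
    have hbr : 2 * k ≤ r - 1 ∧ r - 1 ≤ 2 * k + 1 := by omega
    have hk1 : 1 ≤ k := by omega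
    have hlow : k * (k + 1) ≤ 2 * n := by nlinarith [hrl, hbr.1]
    have hhigh : 2 * n < (k + 1) * (k + 2) := by nlinarith [hru, hbr.2]
    have heven : Even (k * (k + 1)) := Int.even_mul_succ_self k
    obtain ⟨e, he⟩ := heven
    have hremfd : PySem.Int.floordiv (k * (k + 1)) 2 = e := by
      rw [PySem.Int.floordiv_eq_ediv_of_pos (by omega)]; omega
    have hmain := vtLoop_spec n k (n - e) hk1 hlow hhigh (by omega) k.toNat 1 n []
      (by omega) (by omega) (by ring_nf) (Or.inr hk1)
    simp only [List.nil_append] at hmain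
    rw [various_terms, hmain]
    show vtBump (PySem.List.pyRange 1 (k + 1) 1) (n - e) =
      vtBump (PySem.List.pyRange 1 (PySem.Int.floordiv (r - 1) 2 + 1) 1)
        (n - PySem.Int.floordiv
          (PySem.Int.floordiv (r - 1) 2 * (PySem.Int.floordiv (r - 1) 2 + 1)) 2)
    rw [hkfd, hremfd]
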